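-- pv_equiv track=rewrite | github.com/davidlzs/advent_of_code | 2015/puzzle3.py | find_rooms
-- ===== SOURCE A (Python) =====
-- def find_rooms(s):
--     visited = {'0_0': 1}
--     x = 0
--     y = 0
--     for c in s:
--         if c == '>':
--             x = x + 1
--         elif c == 'v':
--             y = y - 1
--         elif c == '<':
--             x = x - 1
--         elif c == '^':
--             y = y + 1
--         cord_str = str(x) + '_' + str(y)
--         visited[cord_str] = visited.get(cord_str, 0) + 1
--     return visited
-- ===== SOURCE B (Python) =====
-- def find_rooms(s):
--     DELTA = {'>': (1, 0), 'v': (0, -1), '<': (-1, 0), '^': (0, 1)}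
--     x = y = 0
--     keys = ['0_0']
--     for c in s:
--         dx, dy = DELTA.get(c, (0, 0))
--         x += dx
--         y += dy
--         keys.append(str(x) + '_' + str(y))
--     visited = {}
--     for k in keys:
--         visited[k] = visited.get(k, 0) + 1
--     return visited
-- ===== Notes on version B (the rewrite author's own statement) =====
-- stated objective: alternative
-- what changed: Replaces the if/elif branch chain fused with per-step dict tallying by a displacement lookup table, a separately materialised prefix-sum list of visited-room keys seeded with the origin, and a second tally pass over that list.
import Mathlib
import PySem

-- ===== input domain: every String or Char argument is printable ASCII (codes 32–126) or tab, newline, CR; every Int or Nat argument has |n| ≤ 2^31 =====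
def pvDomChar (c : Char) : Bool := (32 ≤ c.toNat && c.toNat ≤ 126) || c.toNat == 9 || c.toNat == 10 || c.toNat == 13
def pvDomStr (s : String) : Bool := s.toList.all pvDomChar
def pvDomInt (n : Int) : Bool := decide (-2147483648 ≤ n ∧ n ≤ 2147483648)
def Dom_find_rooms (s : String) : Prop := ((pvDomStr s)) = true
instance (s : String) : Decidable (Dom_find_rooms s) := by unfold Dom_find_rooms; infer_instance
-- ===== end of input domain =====

-- B replaces A's fused if/elif-and-tally loop by a displacement lookup table, a prefix-sum
-- list of visited-room keys seeded with the origin, and a separate tally pass (objective: alternative).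

-- ===== PORT A =====
-- str(x) + '_' + str(y)  (shared by both Pythons, literally this concatenation)
def pvKey (x y : Int) : String :=
  String.ofList (PySem.Int.toChars x ++ '_' :: PySem.Int.toChars y)

-- the body of A's for-loop
def pvStepA (st : PySem.Dict String Int × Int × Int) (c : Char) :
    PySem.Dict String Int × Int × Int :=
  let p : Int × Int :=
    if c = '>' then (st.2.1 + 1, st.2.2)
    else if c = 'v' then (st.2.1, st.2.2 - 1)
    else if c = '<' then (st.2.1 - 1, st.2.2)
    else if c = '^' then (st.2.1, st.2.2 + 1)
    else (st.2.1, st.2.2)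
  let key := pvKey p.1 p.2
  (st.1.insert key (st.1.getD key 0 + 1), p.1, p.2)

def find_rooms (s : String) : List (String × Int) :=
  (s.toList.foldl pvStepA (PySem.Dict.ofList [("0_0", 1)], 0, 0)).1.items

-- ===== PORT B =====
def pvDelta : PySem.Dict Char (Int × Int) :=
  PySem.Dict.ofList [('>', (1, 0)), ('v', (0, -1)), ('<', (-1, 0)), ('^', (0, 1))]

-- the body of B's first for-loop (prefix-sum of displacements, appending keys)
def pvStepB (st : Int × Int × List String) (c : Char) : Int × Int × List String :=
  let d := pvDelta.getD c (0, 0)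
  let x := st.1 + d.1
  let y := st.2.1 + d.2
  (x, y, st.2.2 ++ [pvKey x y])

-- the body of B's second for-loop (tally)
def pvTally (v : PySem.Dict String Int) (k : String) : PySem.Dict String Int :=
  v.insert k (v.getD k 0 + 1)

def find_rooms_alt (s : String) : List (String × Int) :=
  let st := s.toList.foldl pvStepB (0, 0, ["0_0"])
  (st.2.2.foldl pvTally PySem.Dict.empty).items

-- ===== PRECONDITION & SPEC =====
def Spec_find_rooms (s : String) (out : List (String × Int)) : Prop := out = find_rooms_alt s
instance (s : String) (out : List (String × Int)) : Decidable (Spec_find_rooms s out) := by unfold Spec_find_rooms; infer_instance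

-- ===== CLAIM (what is proved, stated in full; the proofs are below) =====
def Claim_equal_find_rooms : Prop := ∀ (s : String), Dom_find_rooms s → Spec_find_rooms s (find_rooms s)

-- ===== LEMMAS AND PROOFS =====

-- the sequence of room keys visited after the start, from position (x, y)
def pvKseq (x y : Int) : List Char → List String
  | [] => []
  | c :: cs =>
    let d := pvDelta.getD c (0, 0)
    pvKey (x + d.1) (y + d.2) :: pvKseq (x + d.1) (y + d.2) cs

-- A's branch chain computes exactly the table displacement
theorem pvMove_eq (c : Char) (x y : Int) :
    (if c = '>' then (x + 1, y)
     else if c = 'v' then (x, y - 1)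
     else if c = '<' then (x - 1, y)
     else if c = '^' then (x, y + 1)
     else (x, y)) = (x + (pvDelta.getD c (0, 0)).1, y + (pvDelta.getD c (0, 0)).2) := by
  have hmk : pvDelta = PySem.Dict.mk [('>', (1, 0)), ('v', (0, -1)), ('<', (-1, 0)), ('^', (0, 1))] := by decide
  by_cases h1 : c = '>'
  · simp [h1, hmk, PySem.Dict.getD, PySem.Dict.get?_mk_cons]
  by_cases h2 : c = 'v'
  · simp [h2, hmk, PySem.Dict.getD, PySem.Dict.get?_mk_cons]; omega
  by_cases h3 : c = '<'
  · simp [h3, hmk, PySem.Dict.getD, PySem.Dict.get?_mk_cons]; omega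
  by_cases h4 : c = '^'
  · simp [h4, hmk, PySem.Dict.getD, PySem.Dict.get?_mk_cons]
  · rw [if_neg h1, if_neg h2, if_neg h3, if_neg h4, hmk]
    simp [PySem.Dict.getD, Ne.symm h1, Ne.symm h2, Ne.symm h3, Ne.symm h4,
      PySem.Dict.get?]

-- A's fold, started at any state, is the tally of the key sequence
theorem pvFoldA_eq (l : List Char) :
    ∀ (v : PySem.Dict String Int) (x y : Int),
      (l.foldl pvStepA (v, x, y)).1 = (pvKseq x y l).foldl pvTally v := by
  induction l with
  | nil => intro v x y; rfl
  | cons c cs ih =>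
    intro v x y
    have hmove := pvMove_eq c x y
    simp only [List.foldl, pvKseq, pvStepA, hmove, pvTally]
    exact ih _ _ _

-- B's first loop appends exactly the key sequence
theorem pvFoldB_eq (l : List Char) :
    ∀ (x y : Int) (acc : List String),
      (l.foldl pvStepB (x, y, acc)).2.2 = acc ++ pvKseq x y l := by
  induction l with
  | nil => intro x y acc; simp [pvKseq]
  | cons c cs ih =>
    intro x y acc
    simp only [List.foldl, pvStepB, pvKseq]
    rw [ih]
    simp

-- ===== VERDICT (by name: the statement is the Claim_ definition above) =====
theorem find_rooms_spec : Claim_equal_find_rooms := by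
  intro s _
  unfold Spec_find_rooms
  simp only [find_rooms, find_rooms_alt]
  rw [pvFoldA_eq, pvFoldB_eq]
  have h0 : PySem.Dict.ofList [("0_0", 1)] =
      pvTally PySem.Dict.empty "0_0" := by decide
  rw [h0]
  rfl
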